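-- pv_equiv track=rewrite | github.com/carrdelling/AdventOfCode2021 | day22/silver.py | solve
-- ===== SOURCE A (Python) =====
-- from collections import Counter
--
-- MAX_V = 50
--
-- MIN_V = -50
--
-- def intercept(a, b):
--
--     ixl = max(a[0], b[0])
--     ixh = min(a[1], b[1])
--     iyl = max(a[2], b[2])
--     iyh = min(a[3], b[3])
--     izl = max(a[4], b[4])
--     izh = min(a[5], b[5])
--
--     if all([(ixl <= ixh), (iyl <= iyh), (izl <= izh)]):
--         return ixl, ixh, iyl, iyh, izl, izh
--     return None
--
-- def solve(ins):
--
--     cubes = Counter()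
--
--     for m, (xl, xh), (yl, yh), (zl, zh) in ins:
--         key = (xl, xh, yl, yh, zl, zh)
--
--         # reverse everything intercepted by the new one
--         intercepts = Counter()
--
--         for inner_cube, v in cubes.items():
--             ki = intercept(key, inner_cube)
--             if ki is not None:
--                 intercepts[ki] -= v
--
--         cubes.update(intercepts)
--         # light on the new cube if positive
--         if m:
--             cubes[key] += 1
--
--     # add all the intercepts
--     solution = 0
--     for (xl, xh, yl, yh, zl, zh), v in cubes.items():
--         sxl = max(xl, MIN_V)
--         sxh = min(xh, MAX_V)
--         syl = max(yl, MIN_V)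
--         syh = min(yh, MAX_V)
--         szl = max(zl, MIN_V)
--         szh = min(zh, MAX_V)
--         if all([(sxl <= sxh), (syl <= syh), (szl <= szh)]):
--             size = (sxh - sxl + 1) * (syh - syl + 1) * (szh - szl + 1)
--             solution += size * v
--
--     return solution
-- ===== SOURCE B (Python) =====
-- MAX_V = 50
--
-- MIN_V = -50
--
--
-- def solve(ins):
--     # Coordinate compression over the +-50 box: cut each axis at every (clipped)
--     # cuboid boundary, then classify each cell by its low corner and add its volume.
--     bound = MAX_V + 1
--
--     def axis_cuts(idx):
--         cs = {MIN_V, bound}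
--         for step in ins:
--             lo, hi = step[idx]
--             cs.add(min(max(lo, MIN_V), bound))
--             cs.add(min(max(hi + 1, MIN_V), bound))
--         return sorted(cs)
--
--     xs = axis_cuts(1)
--     ys = axis_cuts(2)
--     zs = axis_cuts(3)
--
--     total = 0
--     for x, x2 in zip(xs, xs[1:]):
--         for y, y2 in zip(ys, ys[1:]):
--             for z, z2 in zip(zs, zs[1:]):
--                 on = 0
--                 for m, (xl, xh), (yl, yh), (zl, zh) in ins:
--                     if xl <= x <= xh and yl <= y <= yh and zl <= z <= zh:
--                         on = m
--                 if on:
--                     total += (x2 - x) * (y2 - y) * (z2 - z)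
--     return total
-- ===== Notes on version B (the rewrite author's own statement) =====
-- stated objective: alternative
-- what changed: A tracks a Counter of signed intersection cuboids (inclusion-exclusion) and sums clipped volumes at the end; B coordinate-compresses each axis to the clipped cuboid boundaries inside the fixed ±50 box, classifies each compressed cell by replaying the instructions at its low corner, and adds the lit cells' volumes.
import Mathlib
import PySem

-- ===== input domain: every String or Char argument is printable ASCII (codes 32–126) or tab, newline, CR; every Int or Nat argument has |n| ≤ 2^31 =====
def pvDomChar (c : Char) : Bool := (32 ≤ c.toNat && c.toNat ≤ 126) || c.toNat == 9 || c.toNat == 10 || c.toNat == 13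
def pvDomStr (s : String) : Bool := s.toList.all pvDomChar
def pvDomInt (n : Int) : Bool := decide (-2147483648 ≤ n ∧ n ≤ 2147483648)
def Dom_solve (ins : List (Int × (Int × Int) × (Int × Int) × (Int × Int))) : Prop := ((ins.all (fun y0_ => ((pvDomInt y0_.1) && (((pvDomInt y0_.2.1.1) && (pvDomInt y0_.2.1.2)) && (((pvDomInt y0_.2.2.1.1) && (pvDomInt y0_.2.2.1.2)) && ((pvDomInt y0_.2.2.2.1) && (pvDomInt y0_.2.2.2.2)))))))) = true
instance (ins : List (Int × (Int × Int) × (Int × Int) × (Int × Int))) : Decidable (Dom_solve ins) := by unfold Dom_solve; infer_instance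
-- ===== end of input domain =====

-- B replaces A's Counter of signed intersection cuboids by coordinate compression of the ±50 box
-- (classify each compressed cell by its low corner, add its volume); objective: alternative algorithm.

-- ===== PORT A =====

def MAX_V : Int := 50
def MIN_V : Int := -50

def intercept (a b : Int × Int × Int × Int × Int × Int) :
    Option (Int × Int × Int × Int × Int × Int) :=
  let ixl := max a.1 b.1
  let ixh := min a.2.1 b.2.1
  let iyl := max a.2.2.1 b.2.2.1
  let iyh := min a.2.2.2.1 b.2.2.2.1
  let izl := max a.2.2.2.2.1 b.2.2.2.2.1
  let izh := min a.2.2.2.2.2 b.2.2.2.2.2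
  if ixl ≤ ixh ∧ iyl ≤ iyh ∧ izl ≤ izh then some (ixl, ixh, iyl, iyh, izl, izh)
  else none

-- one iteration of A's main loop (Counter update: missing keys count 0, `c[k] ± v` is modify)
def stepA (cubes : PySem.Dict (Int × Int × Int × Int × Int × Int) Int)
    (i : Int × (Int × Int) × (Int × Int) × (Int × Int)) :
    PySem.Dict (Int × Int × Int × Int × Int × Int) Int :=
  let key := (i.2.1.1, i.2.1.2, i.2.2.1.1, i.2.2.1.2, i.2.2.2.1, i.2.2.2.2)
  let intercepts :=
    cubes.items.foldl (fun acc cv =>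
      match intercept key cv.1 with
      | some ki => acc.modify ki 0 (· - cv.2)
      | none => acc) PySem.Dict.empty
  let cubes := intercepts.items.foldl (fun d kv => d.modify kv.1 0 (· + kv.2)) cubes
  if i.1 ≠ 0 then cubes.modify key 0 (· + 1) else cubes

def solve (ins : List (Int × (Int × Int) × (Int × Int) × (Int × Int))) : Int :=
  let cubes := ins.foldl stepA PySem.Dict.empty
  cubes.items.foldl (fun sol cv =>
    let sxl := max cv.1.1 MIN_V
    let sxh := min cv.1.2.1 MAX_V
    let syl := max cv.1.2.2.1 MIN_V
    let syh := min cv.1.2.2.2.1 MAX_V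
    let szl := max cv.1.2.2.2.2.1 MIN_V
    let szh := min cv.1.2.2.2.2.2 MAX_V
    if sxl ≤ sxh ∧ syl ≤ syh ∧ szl ≤ szh then
      sol + (sxh - sxl + 1) * (syh - syl + 1) * (szh - szl + 1) * cv.2
    else sol) 0

-- ===== PORT B =====

-- Source B's axis_cuts(idx): a set of clipped boundaries, then sorted
def axisCuts (ins : List (Int × (Int × Int) × (Int × Int) × (Int × Int)))
    (get : Int × (Int × Int) × (Int × Int) × (Int × Int) → Int × Int) : List Int :=
  let cs : PySem.Set Int := PySem.Set.ofList [MIN_V, MAX_V + 1]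
  let cs := ins.foldl (fun cs step =>
    let lh := get step
    let cs := cs.add (min (max lh.1 MIN_V) (MAX_V + 1))
    cs.add (min (max (lh.2 + 1) MIN_V) (MAX_V + 1))) cs
  PySem.List.sorted cs (fun x => x)

def solve_alt (ins : List (Int × (Int × Int) × (Int × Int) × (Int × Int))) : Int :=
  let xs := axisCuts ins (fun s => s.2.1)
  let ys := axisCuts ins (fun s => s.2.2.1)
  let zs := axisCuts ins (fun s => s.2.2.2)
  (xs.zip xs.tail).foldl (fun total xp =>
    (ys.zip ys.tail).foldl (fun total yp =>
      (zs.zip zs.tail).foldl (fun total zp =>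
        let on := ins.foldl (fun on i =>
          if i.2.1.1 ≤ xp.1 ∧ xp.1 ≤ i.2.1.2 ∧ i.2.2.1.1 ≤ yp.1 ∧ yp.1 ≤ i.2.2.1.2 ∧
             i.2.2.2.1 ≤ zp.1 ∧ zp.1 ≤ i.2.2.2.2 then i.1 else on) 0
        if on ≠ 0 then total + (xp.2 - xp.1) * (yp.2 - yp.1) * (zp.2 - zp.1) else total)
      total) total) 0

-- ===== PRECONDITION & SPEC =====
def Spec_solve (ins : List (Int × (Int × Int) × (Int × Int) × (Int × Int))) (out : Int) : Prop := out = solve_alt ins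
instance (ins : List (Int × (Int × Int) × (Int × Int) × (Int × Int))) (out : Int) : Decidable (Spec_solve ins out) := by unfold Spec_solve; infer_instance

-- ===== CLAIM (what is proved, stated in full; the proofs are below) =====
def Claim_equal_solve : Prop := ∀ (ins : List (Int × (Int × Int) × (Int × Int) × (Int × Int))), Dom_solve ins → Spec_solve ins (solve ins)

-- ===== LEMMAS AND PROOFS =====

-- cuboid membership test for a point
def covB (c : Int × Int × Int × Int × Int × Int) (p : Int × Int × Int) : Bool :=
  decide (c.1 ≤ p.1 ∧ p.1 ≤ c.2.1 ∧ c.2.2.1 ≤ p.2.1 ∧ p.2.1 ≤ c.2.2.2.1 ∧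
          c.2.2.2.2.1 ≤ p.2.2 ∧ p.2.2 ≤ c.2.2.2.2.2)

def keyOf (i : Int × (Int × Int) × (Int × Int) × (Int × Int)) :
    Int × Int × Int × Int × Int × Int :=
  (i.2.1.1, i.2.1.2, i.2.2.1.1, i.2.2.1.2, i.2.2.2.1, i.2.2.2.2)

-- 0/1 state of a point after all instructions (the last covering instruction wins)
def litA (ins : List (Int × (Int × Int) × (Int × Int) × (Int × Int))) (p : Int × Int × Int) : Int :=
  ins.foldl (fun v i => if covB (keyOf i) p then (if i.1 ≠ 0 then 1 else 0) else v) 0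

-- raw last `m` of a covering instruction (B's `on` accumulator)
def litM (ins : List (Int × (Int × Int) × (Int × Int) × (Int × Int))) (p : Int × Int × Int) : Int :=
  ins.foldl (fun v i => if covB (keyOf i) p then i.1 else v) 0

-- signed multiplicity A's Counter of cuboids assigns to a point
def pSum (d : PySem.Dict (Int × Int × Int × Int × Int × Int) Int) (p : Int × Int × Int) : Int :=
  (d.items.map (fun cv => if covB cv.1 p then cv.2 else 0)).sum

noncomputable def Box : Finset (Int × Int × Int) :=
  Finset.Icc (-50) 50 ×ˢ (Finset.Icc (-50) 50 ×ˢ Finset.Icc (-50) 50)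

def clamp (t : Int) : Int := min (max t (-50)) 51


-- generic list-sum lemmas

theorem sum_map_update {α : Type} (l : List α) (f g : α → Int) (k : α)
    (hnd : l.Nodup) (hk : k ∈ l) (h : ∀ a ∈ l, a ≠ k → f a = g a) :
    (l.map g).sum = (l.map f).sum + (g k - f k) := by
  induction l with
  | nil => cases hk
  | cons a t ih =>
    rcases List.nodup_cons.1 hnd with ⟨hna, hnt⟩
    rcases List.mem_cons.1 hk with rfl | hk'
    · have ht : t.map g = t.map f :=
        List.map_congr_left (fun b hb => (h b (List.mem_cons_of_mem _ hb)
          (fun hbk => hna (hbk ▸ hb))).symm)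
      simp [ht]; ring
    · have ha : f a = g a := h a (List.mem_cons_self) (fun h' => hna (h' ▸ hk'))
      simp only [List.map_cons, List.sum_cons,
        ih hnt hk' (fun b hb hbk => h b (List.mem_cons_of_mem _ hb) hbk), ha]
      ring

theorem sum_comm_list {α β : Type} (s : Finset α) (l : List β) (f : α → β → Int) :
    ∑ x ∈ s, (l.map (f x)).sum = (l.map (fun b => ∑ x ∈ s, f x b)).sum := by
  induction l with
  | nil => simp
  | cons b t ih => simp [Finset.sum_add_distrib, ih]

theorem nodup_keys_modify (d : PySem.Dict (Int × Int × Int × Int × Int × Int) Int)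
    (k : Int × Int × Int × Int × Int × Int) (f : Int → Int) (h : d.keys.Nodup) :
    (d.modify k 0 f).keys.Nodup := by
  rw [PySem.Dict.keys_modify]; exact PySem.Dict.nodup_keys_insert _ _ _ h

theorem getD_not_contains (d : PySem.Dict (Int × Int × Int × Int × Int × Int) Int)
    (k : Int × Int × Int × Int × Int × Int) (h : d.contains k = false) : d.getD k 0 = 0 := by
  simp [PySem.Dict.getD, (PySem.Dict.get?_eq_none_iff_contains d k).2 h]

theorem pSum_eq_keys (d : PySem.Dict (Int × Int × Int × Int × Int × Int) Int)
    (hnd : d.keys.Nodup) (p : Int × Int × Int) :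
    pSum d p = (d.keys.map (fun k => if covB k p then d.getD k 0 else 0)).sum := by
  rw [pSum, PySem.Dict.items_eq_map_keys d hnd 0, List.map_map]; rfl

theorem pSum_modify (d : PySem.Dict (Int × Int × Int × Int × Int × Int) Int)
    (hnd : d.keys.Nodup) (k : Int × Int × Int × Int × Int × Int) (v : Int) (p : Int × Int × Int) :
    pSum (d.modify k 0 (· + v)) p = pSum d p + (if covB k p then v else 0) := by
  have hnd' : (d.modify k 0 (· + v)).keys.Nodup := nodup_keys_modify d k _ hnd
  rw [pSum_eq_keys _ hnd' p, pSum_eq_keys _ hnd p]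
  have hgd : ∀ k', (d.modify k 0 (· + v)).getD k' 0 = if k' = k then d.getD k 0 + v else d.getD k' 0 :=
    fun k' => PySem.Dict.getD_modify d k k' 0 _
  by_cases hc : d.contains k = true
  · have hkeys : (d.modify k 0 (· + v)).keys = d.keys := by
      rw [PySem.Dict.keys_modify, PySem.Dict.keys_insert_of_contains d _ hc]
    rw [hkeys]
    have hkmem : k ∈ d.keys := (PySem.Dict.contains_iff_mem_keys d k).1 hc
    rw [sum_map_update d.keys (fun k' => if covB k' p then d.getD k' 0 else 0)
      (fun k' => if covB k' p then (d.modify k 0 (· + v)).getD k' 0 else 0) k hnd hkmem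
      (fun a _ hak => by simp only [hgd a, if_neg hak])]
    rw [hgd k, if_pos rfl]
    split_ifs <;> ring
  · have hc' : d.contains k = false := by simpa using hc
    have hkeys : (d.modify k 0 (· + v)).keys = d.keys ++ [k] := by
      rw [PySem.Dict.keys_modify, PySem.Dict.keys_insert_of_not_contains d _ hc']
    rw [hkeys, List.map_append, List.sum_append]
    have hkn : k ∉ d.keys := fun hm => by
      rw [(PySem.Dict.contains_iff_mem_keys d k).2 hm] at hc'; cases hc'
    have hold : d.keys.map (fun k' => if covB k' p then (d.modify k 0 (· + v)).getD k' 0 else 0)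
        = d.keys.map (fun k' => if covB k' p then d.getD k' 0 else 0) :=
      List.map_congr_left (fun a ha => by
        simp only [hgd a]
        rw [if_neg (fun h' : a = k => hkn (h' ▸ ha))])
    rw [hold]
    simp only [List.map_cons, List.map_nil, List.sum_cons, List.sum_nil, hgd k,
      getD_not_contains d k hc']
    simp
theorem covB_intercept_some (a b k : Int × Int × Int × Int × Int × Int) (p : Int × Int × Int)
    (h : intercept a b = some k) : covB k p = (covB a p && covB b p) := by
  obtain ⟨a1,a2,a3,a4,a5,a6⟩ := a
  obtain ⟨b1,b2,b3,b4,b5,b6⟩ := b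
  obtain ⟨p1,p2,p3⟩ := p
  simp only [intercept] at h
  split_ifs at h with hcond
  · obtain ⟨k1,k2,k3,k4,k5,k6⟩ := k
    injection h with h'
    simp only [Prod.mk.injEq] at h'
    obtain ⟨rfl, rfl, rfl, rfl, rfl, rfl⟩ := h'
    simp only [covB]
    rw [Bool.eq_iff_iff]
    simp only [Bool.and_eq_true, decide_eq_true_eq]
    omega

theorem covB_intercept_none (a b : Int × Int × Int × Int × Int × Int) (p : Int × Int × Int)
    (h : intercept a b = none) : (covB a p && covB b p) = false := by
  obtain ⟨a1,a2,a3,a4,a5,a6⟩ := a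
  obtain ⟨b1,b2,b3,b4,b5,b6⟩ := b
  obtain ⟨p1,p2,p3⟩ := p
  simp only [intercept] at h
  split_ifs at h with hcond
  simp only [covB]
  rw [Bool.eq_false_iff]
  simp only [ne_eq, Bool.and_eq_true, decide_eq_true_eq, not_and_or]
  simp only [not_and_or] at hcond
  omega

theorem pSum_modify_sub (d : PySem.Dict (Int × Int × Int × Int × Int × Int) Int)
    (hnd : d.keys.Nodup) (k : Int × Int × Int × Int × Int × Int) (v : Int) (p : Int × Int × Int) :
    pSum (d.modify k 0 (· - v)) p = pSum d p + (if covB k p then -v else 0) := by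
  have : (fun x : Int => x - v) = (fun x : Int => x + (-v)) := funext fun x => sub_eq_add_neg x v
  rw [this]
  exact pSum_modify d hnd k (-v) p

theorem pSum_intercepts (key : Int × Int × Int × Int × Int × Int)
    (l : List ((Int × Int × Int × Int × Int × Int) × Int))
    (acc : PySem.Dict (Int × Int × Int × Int × Int × Int) Int) (hacc : acc.keys.Nodup)
    (p : Int × Int × Int) :
    pSum (l.foldl (fun acc cv =>
      match intercept key cv.1 with
      | some ki => acc.modify ki 0 (· - cv.2)
      | none => acc) acc) p
    = pSum acc p - (if covB key p then (l.map (fun cv => if covB cv.1 p then cv.2 else 0)).sum else 0) := by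
  induction l generalizing acc with
  | nil => simp
  | cons cv t ih =>
    rw [List.foldl_cons]
    cases hki : intercept key cv.1 with
    | some ki =>
      rw [show (match some ki with
          | some ki => acc.modify ki 0 (· - cv.2)
          | none => acc) = acc.modify ki 0 (· - cv.2) from rfl]
      rw [ih _ (by rw [PySem.Dict.keys_modify]; exact PySem.Dict.nodup_keys_insert _ _ _ hacc)]
      rw [pSum_modify_sub acc hacc ki cv.2 p]
      have hcov := covB_intercept_some key cv.1 ki p hki
      rw [hcov]
      simp only [List.map_cons, List.sum_cons]
      cases h1 : covB key p <;> cases h2 : covB cv.1 p <;> simp [h1, h2] <;> ring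
    | none =>
      rw [show (match (none : Option (Int × Int × Int × Int × Int × Int)) with
          | some ki => acc.modify ki 0 (· - cv.2)
          | none => acc) = acc from rfl, ih acc hacc]
      have hcov := covB_intercept_none key cv.1 p hki
      simp only [List.map_cons, List.sum_cons]
      cases h1 : covB key p <;> cases h2 : covB cv.1 p <;> simp_all

theorem nodup_keys_modify' (d : PySem.Dict (Int × Int × Int × Int × Int × Int) Int)
    (k : Int × Int × Int × Int × Int × Int) (d0 : Int) (f : Int → Int) (h : d.keys.Nodup) :
    (d.modify k d0 f).keys.Nodup := by
  rw [PySem.Dict.keys_modify]; exact PySem.Dict.nodup_keys_insert _ _ _ h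

theorem nodup_intercepts (key : Int × Int × Int × Int × Int × Int)
    (l : List ((Int × Int × Int × Int × Int × Int) × Int))
    (acc : PySem.Dict (Int × Int × Int × Int × Int × Int) Int) (hacc : acc.keys.Nodup) :
    ((l.foldl (fun acc cv =>
      match intercept key cv.1 with
      | some ki => acc.modify ki 0 (· - cv.2)
      | none => acc) acc)).keys.Nodup := by
  induction l generalizing acc with
  | nil => exact hacc
  | cons cv t ih =>
    rw [List.foldl_cons]
    cases hki : intercept key cv.1 with
    | some ki =>
      rw [show (match some ki with
          | some ki => acc.modify ki 0 (· - cv.2)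
          | none => acc) = acc.modify ki 0 (· - cv.2) from rfl]
      exact ih _ (nodup_keys_modify' acc ki 0 _ hacc)
    | none =>
      rw [show (match (none : Option (Int × Int × Int × Int × Int × Int)) with
          | some ki => acc.modify ki 0 (· - cv.2)
          | none => acc) = acc from rfl]
      exact ih acc hacc

theorem pSum_update (l : List ((Int × Int × Int × Int × Int × Int) × Int))
    (d : PySem.Dict (Int × Int × Int × Int × Int × Int) Int) (hd : d.keys.Nodup)
    (p : Int × Int × Int) :
    pSum (l.foldl (fun d kv => d.modify kv.1 0 (· + kv.2)) d) p
      = pSum d p + (l.map (fun kv => if covB kv.1 p then kv.2 else 0)).sum := by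
  induction l generalizing d with
  | nil => simp
  | cons kv t ih =>
    rw [List.foldl_cons, ih _ (nodup_keys_modify' d kv.1 0 _ hd),
      pSum_modify d hd kv.1 kv.2 p]
    simp only [List.map_cons, List.sum_cons]
    ring

theorem nodup_update (l : List ((Int × Int × Int × Int × Int × Int) × Int))
    (d : PySem.Dict (Int × Int × Int × Int × Int × Int) Int) (hd : d.keys.Nodup) :
    ((l.foldl (fun d kv => d.modify kv.1 0 (· + kv.2)) d)).keys.Nodup := by
  induction l generalizing d with
  | nil => exact hd
  | cons kv t ih => exact ih _ (nodup_keys_modify' d kv.1 0 _ hd)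
theorem nodup_stepA (d : PySem.Dict (Int × Int × Int × Int × Int × Int) Int)
    (i : Int × (Int × Int) × (Int × Int) × (Int × Int)) (hd : d.keys.Nodup) :
    (stepA d i).keys.Nodup := by
  simp only [stepA]
  split_ifs with hm
  · exact nodup_keys_modify' _ _ 0 _ (nodup_update _ d hd)
  · exact nodup_update _ d hd

theorem pSum_stepA (d : PySem.Dict (Int × Int × Int × Int × Int × Int) Int)
    (i : Int × (Int × Int) × (Int × Int) × (Int × Int)) (hd : d.keys.Nodup) (p : Int × Int × Int) :
    pSum (stepA d i) p = if covB (keyOf i) p then (if i.1 ≠ 0 then 1 else 0) else pSum d p := by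
  simp only [stepA]
  have hempty : (PySem.Dict.empty : PySem.Dict (Int × Int × Int × Int × Int × Int) Int).keys.Nodup :=
    PySem.Dict.nodup_keys_empty
  have hIp : pSum (d.items.foldl (fun acc cv =>
      match intercept (i.2.1.1, i.2.1.2, i.2.2.1.1, i.2.2.1.2, i.2.2.2.1, i.2.2.2.2) cv.1 with
      | some ki => acc.modify ki 0 (· - cv.2)
      | none => acc) PySem.Dict.empty) p
      = - (if covB (keyOf i) p then pSum d p else 0) := by
    rw [pSum_intercepts _ d.items PySem.Dict.empty hempty p]
    have h0 : pSum (PySem.Dict.empty : PySem.Dict (Int × Int × Int × Int × Int × Int) Int) p = 0 := rfl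
    rw [h0, zero_sub]
    rfl
  have hIn := nodup_intercepts (i.2.1.1, i.2.1.2, i.2.2.1.1, i.2.2.1.2, i.2.2.2.1, i.2.2.2.2)
    d.items PySem.Dict.empty hempty
  have hU : pSum ((d.items.foldl (fun acc cv =>
      match intercept (i.2.1.1, i.2.1.2, i.2.2.1.1, i.2.2.1.2, i.2.2.2.1, i.2.2.2.2) cv.1 with
      | some ki => acc.modify ki 0 (· - cv.2)
      | none => acc) PySem.Dict.empty).items.foldl (fun d kv => d.modify kv.1 0 (· + kv.2)) d) p
      = pSum d p + pSum (d.items.foldl (fun acc cv =>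
      match intercept (i.2.1.1, i.2.1.2, i.2.2.1.1, i.2.2.1.2, i.2.2.2.1, i.2.2.2.2) cv.1 with
      | some ki => acc.modify ki 0 (· - cv.2)
      | none => acc) PySem.Dict.empty) p := pSum_update _ d hd p
  by_cases hm : i.1 = 0
  · rw [if_neg (by simp [hm])]
    rw [hU, hIp]
    cases hcv : covB (keyOf i) p <;> simp [hcv, hm]
  · rw [if_pos (by simpa using hm)]
    rw [pSum_modify _ (nodup_update _ d hd) _ 1 p, hU, hIp]
    have hk : covB (i.2.1.1, i.2.1.2, i.2.2.1.1, i.2.2.1.2, i.2.2.2.1, i.2.2.2.2) p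
        = covB (keyOf i) p := rfl
    rw [hk]
    cases hcv : covB (keyOf i) p <;> simp [hcv, hm]

theorem pSum_foldl (ins : List (Int × (Int × Int) × (Int × Int) × (Int × Int)))
    (d : PySem.Dict (Int × Int × Int × Int × Int × Int) Int) (hd : d.keys.Nodup)
    (p : Int × Int × Int) :
    pSum (ins.foldl stepA d) p
      = ins.foldl (fun v i => if covB (keyOf i) p then (if i.1 ≠ 0 then 1 else 0) else v) (pSum d p) := by
  induction ins generalizing d with
  | nil => rfl
  | cons i t ih =>
    rw [List.foldl_cons, List.foldl_cons, ih _ (nodup_stepA d i hd), pSum_stepA d i hd p]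

theorem nodup_foldl_stepA (ins : List (Int × (Int × Int) × (Int × Int) × (Int × Int)))
    (d : PySem.Dict (Int × Int × Int × Int × Int × Int) Int) (hd : d.keys.Nodup) :
    ((ins.foldl stepA d)).keys.Nodup := by
  induction ins generalizing d with
  | nil => exact hd
  | cons i t ih => exact ih _ (nodup_stepA d i hd)

theorem sum_ind_1d (l h : Int) :
    ∑ x ∈ Finset.Icc (-50 : Int) 50, (if l ≤ x ∧ x ≤ h then (1 : Int) else 0)
      = if max l (-50) ≤ min h 50 then min h 50 - max l (-50) + 1 else 0 := by
  have hmem : ∀ x : Int, (if l ≤ x ∧ x ≤ h then (1 : Int) else 0)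
      = if x ∈ Finset.Icc l h then 1 else 0 := by
    intro x; simp [Finset.mem_Icc]
  simp only [hmem]
  rw [Finset.sum_ite_mem]
  have hint : Finset.Icc (-50 : Int) 50 ∩ Finset.Icc l h = Finset.Icc (max (-50) l) (min 50 h) := by
    ext x; simp [Finset.mem_Icc]; omega
  rw [hint, Finset.sum_const, Int.card_Icc, nsmul_eq_mul, mul_one]
  split_ifs <;> omega

set_option maxHeartbeats 1000000 in
theorem sum_cov_box (c : Int × Int × Int × Int × Int × Int) :
    ∑ p ∈ Box, (if covB c p then (1 : Int) else 0)
      = if max c.1 (-50) ≤ min c.2.1 50 ∧ max c.2.2.1 (-50) ≤ min c.2.2.2.1 50 ∧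
           max c.2.2.2.2.1 (-50) ≤ min c.2.2.2.2.2 50 then
          (min c.2.1 50 - max c.1 (-50) + 1) * (min c.2.2.2.1 50 - max c.2.2.1 (-50) + 1) *
            (min c.2.2.2.2.2 50 - max c.2.2.2.2.1 (-50) + 1)
        else 0 := by
  rw [Box, Finset.sum_product]
  have hsplit : ∀ (x : Int) (yz : Int × Int), (if covB c (x, yz) then (1:Int) else 0)
      = (if c.1 ≤ x ∧ x ≤ c.2.1 then (1:Int) else 0) *
        ((if c.2.2.1 ≤ yz.1 ∧ yz.1 ≤ c.2.2.2.1 then (1:Int) else 0) *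
         (if c.2.2.2.2.1 ≤ yz.2 ∧ yz.2 ≤ c.2.2.2.2.2 then (1:Int) else 0)) := by
    intro x yz
    simp only [covB, decide_eq_true_eq]
    split_ifs <;> simp_all
  simp only [hsplit]
  have hyz : ∀ x : Int, ∑ yz ∈ (Finset.Icc (-50:Int) 50 ×ˢ Finset.Icc (-50:Int) 50),
      ((if c.1 ≤ x ∧ x ≤ c.2.1 then (1:Int) else 0) *
        ((if c.2.2.1 ≤ yz.1 ∧ yz.1 ≤ c.2.2.2.1 then (1:Int) else 0) *
         (if c.2.2.2.2.1 ≤ yz.2 ∧ yz.2 ≤ c.2.2.2.2.2 then (1:Int) else 0)))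
      = (if c.1 ≤ x ∧ x ≤ c.2.1 then (1:Int) else 0) *
        ((∑ y ∈ Finset.Icc (-50:Int) 50, (if c.2.2.1 ≤ y ∧ y ≤ c.2.2.2.1 then (1:Int) else 0)) *
         (∑ z ∈ Finset.Icc (-50:Int) 50, (if c.2.2.2.2.1 ≤ z ∧ z ≤ c.2.2.2.2.2 then (1:Int) else 0))) := by
    intro x
    rw [Finset.sum_product]
    simp only [← Finset.mul_sum]
    congr 1
    rw [Finset.sum_mul_sum]
  simp only [hyz]
  rw [← Finset.sum_mul]
  rw [sum_ind_1d, sum_ind_1d, sum_ind_1d]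
  split_ifs <;> simp_all <;> ring

theorem solveA_eq (ins : List (Int × (Int × Int) × (Int × Int) × (Int × Int))) :
    solve ins = ∑ p ∈ Box, litA ins p := by
  simp only [solve, MIN_V, MAX_V]
  have hnd : ((ins.foldl stepA PySem.Dict.empty)).keys.Nodup :=
    nodup_foldl_stepA ins PySem.Dict.empty PySem.Dict.nodup_keys_empty
  rw [PySem.List.foldl_congr_mem _ _
    (fun sol cv => sol + (if max cv.1.1 (-50) ≤ min cv.1.2.1 50 ∧
        max cv.1.2.2.1 (-50) ≤ min cv.1.2.2.2.1 50 ∧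
        max cv.1.2.2.2.2.1 (-50) ≤ min cv.1.2.2.2.2.2 50 then
      (min cv.1.2.1 50 - max cv.1.1 (-50) + 1) * (min cv.1.2.2.2.1 50 - max cv.1.2.2.1 (-50) + 1) *
        (min cv.1.2.2.2.2.2 50 - max cv.1.2.2.2.2.1 (-50) + 1) * cv.2
    else 0)) 0
    (by intro acc cv _; beta_reduce; split_ifs <;> simp)]
  rw [PySem.List.foldl_add]
  rw [List.map_congr_left (fun cv _ => by
    show _ = ∑ p ∈ Box, (if covB cv.1 p then cv.2 else 0)
    have hs : ∀ p : Int × Int × Int, (if covB cv.1 p then cv.2 else 0)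
        = (if covB cv.1 p then (1:Int) else 0) * cv.2 := by
      intro p; split_ifs <;> simp
    simp only [hs]
    rw [← Finset.sum_mul, sum_cov_box cv.1]
    split_ifs <;> simp)]
  rw [← sum_comm_list Box ((ins.foldl stepA PySem.Dict.empty)).items
    (fun p cv => if covB cv.1 p then cv.2 else 0)]
  rw [zero_add]
  refine Finset.sum_congr rfl (fun p _ => ?_)
  have := pSum_foldl ins PySem.Dict.empty PySem.Dict.nodup_keys_empty p
  have h0 : pSum (PySem.Dict.empty : PySem.Dict (Int × Int × Int × Int × Int × Int) Int) p = 0 := rfl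
  rw [h0] at this
  exact this


-- B side: cut lists, chain combinatorics, cell constancy

theorem foldl_add_mem (ins : List (Int × (Int × Int) × (Int × Int) × (Int × Int)))
    (get : Int × (Int × Int) × (Int × Int) × (Int × Int) → Int × Int) (s0 : PySem.Set Int) (y : Int) :
    (y ∈ (ins.foldl (fun (cs : PySem.Set Int) step =>
        let lh := get step
        let cs := cs.add (min (max lh.1 MIN_V) (MAX_V + 1))
        cs.add (min (max (lh.2 + 1) MIN_V) (MAX_V + 1))) s0 : List Int)) ↔
      y ∈ (s0 : List Int) ∨ ∃ i ∈ ins, y = clamp (get i).1 ∨ y = clamp ((get i).2 + 1) := by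
  induction ins generalizing s0 with
  | nil => simp
  | cons i t ih =>
    rw [List.foldl_cons, ih]
    simp only [PySem.Set.mem_add, List.mem_cons, clamp, MIN_V, MAX_V]
    constructor
    · rintro (((h | h) | h) | ⟨j, hj, hc⟩)
      · exact Or.inl h
      · exact Or.inr ⟨i, Or.inl rfl, Or.inl (by rw [h]; rfl)⟩
      · exact Or.inr ⟨i, Or.inl rfl, Or.inr (by rw [h]; rfl)⟩
      · exact Or.inr ⟨j, Or.inr hj, hc⟩
    · rintro (h | ⟨j, hj, hc⟩)
      · exact Or.inl (Or.inl (Or.inl h))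
      · rcases hj with rfl | hj'
        · rcases hc with h | h
          · exact Or.inl (Or.inl (Or.inr (by rw [h]; rfl)))
          · exact Or.inl (Or.inr (by rw [h]; rfl))
        · exact Or.inr ⟨j, hj', hc⟩

theorem foldl_add_nodup (ins : List (Int × (Int × Int) × (Int × Int) × (Int × Int)))
    (get : Int × (Int × Int) × (Int × Int) × (Int × Int) → Int × Int) (s0 : PySem.Set Int)
    (h : (s0 : List Int).Nodup) :
    ((ins.foldl (fun (cs : PySem.Set Int) step =>
        let lh := get step
        let cs := cs.add (min (max lh.1 MIN_V) (MAX_V + 1))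
        cs.add (min (max (lh.2 + 1) MIN_V) (MAX_V + 1))) s0 : List Int)).Nodup := by
  induction ins generalizing s0 with
  | nil => exact h
  | cons i t ih => exact ih _ (PySem.Set.nodup_add _ _ (PySem.Set.nodup_add _ _ h))

theorem axisCuts_mem (ins : List (Int × (Int × Int) × (Int × Int) × (Int × Int)))
    (get : Int × (Int × Int) × (Int × Int) × (Int × Int) → Int × Int) (y : Int) :
    y ∈ axisCuts ins get ↔
      y = -50 ∨ y = 51 ∨ ∃ i ∈ ins, y = clamp (get i).1 ∨ y = clamp ((get i).2 + 1) := by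
  rw [axisCuts]
  rw [(PySem.List.sorted_perm _ _ _).mem_iff]
  rw [foldl_add_mem]
  rw [PySem.Set.mem_ofList]
  simp [MIN_V, MAX_V, or_assoc]

theorem axisCuts_sorted (ins : List (Int × (Int × Int) × (Int × Int) × (Int × Int)))
    (get : Int × (Int × Int) × (Int × Int) × (Int × Int) → Int × Int) :
    (axisCuts ins get).Pairwise (· < ·) := by
  rw [axisCuts]
  have hnd : (axisCuts ins get).Nodup := by
    rw [axisCuts]
    exact ((PySem.List.sorted_perm _ _ _).nodup_iff).2
      (foldl_add_nodup ins get _ (PySem.Set.nodup_ofList _))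
  have hle := PySem.List.sorted_pairwise (κ := Int)
    ((ins.foldl (fun (cs : PySem.Set Int) step =>
        let lh := get step
        let cs := cs.add (min (max lh.1 MIN_V) (MAX_V + 1))
        cs.add (min (max (lh.2 + 1) MIN_V) (MAX_V + 1))) (PySem.Set.ofList [MIN_V, MAX_V + 1]) : List Int))
    (fun x => x)
  rw [axisCuts] at hnd
  exact (hnd.and hle).imp (fun h => lt_of_le_of_ne h.2 h.1)

theorem axisCuts_bounds (ins : List (Int × (Int × Int) × (Int × Int) × (Int × Int)))
    (get : Int × (Int × Int) × (Int × Int) × (Int × Int) → Int × Int) (y : Int)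
    (h : y ∈ axisCuts ins get) : -50 ≤ y ∧ y ≤ 51 := by
  rcases (axisCuts_mem ins get y).1 h with rfl | rfl | ⟨i, _, rfl | rfl⟩ <;>
    simp [clamp]

theorem chain_no_between (l : List Int) (hp : l.Pairwise (· < ·)) (c c2 y : Int)
    (hadj : (c, c2) ∈ l.zip l.tail) (hy : y ∈ l) : y ≤ c ∨ c2 ≤ y := by
  induction l with
  | nil => cases hy
  | cons a t ih =>
    cases t with
    | nil => simp at hadj
    | cons b t' =>
      rcases List.mem_cons.1 hadj with heq | hmem
      · obtain ⟨rfl, rfl⟩ := Prod.mk.inj heq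
        rcases List.mem_cons.1 hy with rfl | hy'
        · exact Or.inl le_rfl
        · right
          rcases List.mem_cons.1 hy' with rfl | hy'' 
          · exact le_rfl
          · exact le_of_lt ((List.pairwise_cons.1 (List.pairwise_cons.1 hp).2).1 y hy'')
      · have hp' := (List.pairwise_cons.1 hp).2
        have hcmem : c ∈ b :: t' := (List.of_mem_zip hmem).1
        rcases List.mem_cons.1 hy with rfl | hy'
        · left
          exact le_of_lt ((List.pairwise_cons.1 hp).1 c hcmem)
        · exact ih hp' hmem hy'

theorem chain_adj_lt (l : List Int) (hp : l.Pairwise (· < ·)) (c c2 : Int)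
    (hadj : (c, c2) ∈ l.zip l.tail) : c < c2 := by
  induction l with
  | nil => simp at hadj
  | cons a t ih =>
    cases t with
    | nil => simp at hadj
    | cons b t' =>
      rcases List.mem_cons.1 hadj with heq | hmem
      · obtain ⟨rfl, rfl⟩ := Prod.mk.inj heq
        exact (List.pairwise_cons.1 hp).1 c2 List.mem_cons_self
      · exact ih (List.pairwise_cons.1 hp).2 hmem

theorem chain_headD (l : List Int) (hp : l.Pairwise (· < ·)) (a : Int) (ha : a ∈ l)
    (hmin : ∀ y ∈ l, a ≤ y) : l.headD 0 = a := by
  cases l with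
  | nil => cases ha
  | cons b t =>
    rcases List.mem_cons.1 ha with rfl | ha'
    · rfl
    · have h1 : b < a := (List.pairwise_cons.1 hp).1 a ha'
      have h2 : a ≤ b := hmin b List.mem_cons_self
      omega

theorem chain_getLastD (l : List Int) (hp : l.Pairwise (· < ·)) (b : Int) (hb : b ∈ l)
    (hmax : ∀ y ∈ l, y ≤ b) : l.getLastD 0 = b := by
  induction l with
  | nil => cases hb
  | cons a t ih =>
    cases t with
    | nil =>
      have : b = a := by simpa using hb
      simp [this]
    | cons c t' =>
      have hbt : b ∈ c :: t' := by
        rcases List.mem_cons.1 hb with rfl | h'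
        · exfalso
          have h1 : b < c := (List.pairwise_cons.1 hp).1 c List.mem_cons_self
          have h2 : c ≤ b := hmax c (List.mem_cons_of_mem _ List.mem_cons_self)
          omega
        · exact h'
      have := ih (List.pairwise_cons.1 hp).2 hbt (fun y hy => hmax y (List.mem_cons_of_mem _ hy))
      simpa using this

theorem chain_le_getLastD (t : List Int) (b : Int) (hp : (b :: t).Pairwise (· < ·)) (d : Int) :
    b ≤ (b :: t).getLastD d := by
  induction t generalizing b d with
  | nil => simp
  | cons c t' ih =>
    have hbc : b < c := (List.pairwise_cons.1 hp).1 c List.mem_cons_self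
    have := ih c ((List.pairwise_cons.1 hp).2) b
    simp only [List.getLastD_cons] at this ⊢
    omega

theorem getLastD_irrel (l : List Int) (hne : l ≠ []) (d d' : Int) : l.getLastD d = l.getLastD d' := by
  cases l with
  | nil => cases hne rfl
  | cons a t => simp [List.getLastD_eq_getLast?, List.getLast?_cons]

theorem sum_Ico_zip (l : List Int) (hp : l.Pairwise (· < ·)) (f : Int → Int) :
    ((l.zip l.tail).map (fun q => ∑ x ∈ Finset.Ico q.1 q.2, f x)).sum
      = ∑ x ∈ Finset.Ico (l.headD 0) (l.getLastD 0), f x := by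
  induction l with
  | nil => simp
  | cons a t ih =>
    cases t with
    | nil => simp
    | cons b t' =>
      have hp' := (List.pairwise_cons.1 hp).2
      have hab : a < b := (List.pairwise_cons.1 hp).1 b List.mem_cons_self
      have hbl : b ≤ (b :: t').getLastD 0 := by
        have := chain_le_getLastD t' b hp' 0
        simpa using this
      have htail : (b :: t').getLastD a = (b :: t').getLastD 0 :=
        getLastD_irrel _ (List.cons_ne_nil _ _) a 0
      calc ((( a :: b :: t').zip (b :: t')).map (fun q => ∑ x ∈ Finset.Ico q.1 q.2, f x)).sum
          = (∑ x ∈ Finset.Ico a b, f x) +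
            (((b :: t').zip t').map (fun q => ∑ x ∈ Finset.Ico q.1 q.2, f x)).sum := by
            simp [List.zip_cons_cons]
        _ = (∑ x ∈ Finset.Ico a b, f x) + ∑ x ∈ Finset.Ico b ((b :: t').getLastD 0), f x := by
            rw [show ((b :: t').zip t') = ((b :: t').zip (b :: t').tail) from rfl, ih hp']
            rfl
        _ = ∑ x ∈ Finset.Ico a ((b :: t').getLastD 0), f x := by
            rw [← Finset.sum_union (by simp [Finset.Ico_disjoint_Ico_consecutive]),
              Finset.Ico_union_Ico_eq_Ico (le_of_lt hab) hbl]
        _ = ∑ x ∈ Finset.Ico ((a :: b :: t').headD 0) ((a :: b :: t').getLastD 0), f x := by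
            rw [show (a :: b :: t').headD 0 = a from rfl, List.getLastD_cons, List.getLastD_cons, List.getLastD_cons]

theorem cell_const_axis (ins : List (Int × (Int × Int) × (Int × Int) × (Int × Int)))
    (get : Int × (Int × Int) × (Int × Int) × (Int × Int) → Int × Int) (c c2 x : Int)
    (hadj : (c, c2) ∈ (axisCuts ins get).zip (axisCuts ins get).tail)
    (hc : c ≤ x) (hx : x < c2) (i : Int × (Int × Int) × (Int × Int) × (Int × Int)) (hi : i ∈ ins) :
    ((get i).1 ≤ x ∧ x ≤ (get i).2) ↔ ((get i).1 ≤ c ∧ c ≤ (get i).2) := by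
  have hsorted := axisCuts_sorted ins get
  have hc_mem : c ∈ axisCuts ins get := (List.of_mem_zip hadj).1
  have hc2_mem : c2 ∈ axisCuts ins get := List.mem_of_mem_tail (List.of_mem_zip hadj).2
  have hcb := axisCuts_bounds ins get c hc_mem
  have hc2b := axisCuts_bounds ins get c2 hc2_mem
  have hlo := chain_no_between _ hsorted c c2 (clamp (get i).1) hadj
    ((axisCuts_mem ins get _).2 (Or.inr (Or.inr ⟨i, hi, Or.inl rfl⟩)))
  have hhi := chain_no_between _ hsorted c c2 (clamp ((get i).2 + 1)) hadj
    ((axisCuts_mem ins get _).2 (Or.inr (Or.inr ⟨i, hi, Or.inr rfl⟩)))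
  simp only [clamp] at hlo hhi
  omega

theorem litA_congr (ins : List (Int × (Int × Int) × (Int × Int) × (Int × Int)))
    (p q : Int × Int × Int) (h : ∀ i ∈ ins, covB (keyOf i) p = covB (keyOf i) q) :
    litA ins p = litA ins q := by
  unfold litA
  exact PySem.List.foldl_congr_mem _ _ _ _ (fun acc i hi => by rw [h i hi])

theorem lit_gen (p : Int × Int × Int) (ins : List (Int × (Int × Int) × (Int × Int) × (Int × Int))) :
    ∀ w : Int, ins.foldl (fun v i => if covB (keyOf i) p then (if i.1 ≠ 0 then 1 else 0) else v)
        (if w ≠ 0 then 1 else 0)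
      = if (ins.foldl (fun v i => if covB (keyOf i) p then i.1 else v) w) ≠ 0 then (1 : Int) else 0 := by
  induction ins with
  | nil => intro w; rfl
  | cons i t ih =>
    intro w
    simp only [List.foldl_cons]
    by_cases hcv : covB (keyOf i) p = true
    · simp only [if_pos hcv]; exact ih i.1
    · simp only [if_neg hcv]; exact ih w

theorem litA_eq_ind (ins : List (Int × (Int × Int) × (Int × Int) × (Int × Int)))
    (p : Int × Int × Int) : litA ins p = if litM ins p ≠ 0 then 1 else 0 := by
  have h := lit_gen p ins 0
  simp only [show (if (0 : Int) ≠ 0 then (1 : Int) else 0) = 0 by norm_num] at h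
  rw [litA, litM, h]

theorem sum_cell (c c2 : Int) (hlt : c < c2) (f : Int → Int)
    (hconst : ∀ x, c ≤ x → x < c2 → f x = f c) :
    ∑ x ∈ Finset.Ico c c2, f x = (c2 - c) * f c := by
  rw [Finset.sum_congr rfl (fun x hx => hconst x (Finset.mem_Ico.1 hx).1 (Finset.mem_Ico.1 hx).2)]
  rw [Finset.sum_const, Int.card_Ico, nsmul_eq_mul]
  rw [Int.toNat_of_nonneg (by omega)]

theorem cov_congr_x (ins : List (Int × (Int × Int) × (Int × Int) × (Int × Int)))
    (i : Int × (Int × Int) × (Int × Int) × (Int × Int)) (hi : i ∈ ins) (c c2 : Int)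
    (hq : (c, c2) ∈ (axisCuts ins (fun s => s.2.1)).zip (axisCuts ins (fun s => s.2.1)).tail)
    (x : Int) (h1 : c ≤ x) (h2 : x < c2) (y z : Int) :
    covB (keyOf i) (x, y, z) = covB (keyOf i) (c, y, z) := by
  have hiff := cell_const_axis ins (fun s => s.2.1) c c2 x hq h1 h2 i hi
  simp only [covB, keyOf]
  rw [decide_eq_decide]
  constructor
  · rintro ⟨ha, hb, rest⟩; exact ⟨(hiff.1 ⟨ha, hb⟩).1, (hiff.1 ⟨ha, hb⟩).2, rest⟩
  · rintro ⟨ha, hb, rest⟩; exact ⟨(hiff.2 ⟨ha, hb⟩).1, (hiff.2 ⟨ha, hb⟩).2, rest⟩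

theorem cov_congr_y (ins : List (Int × (Int × Int) × (Int × Int) × (Int × Int)))
    (i : Int × (Int × Int) × (Int × Int) × (Int × Int)) (hi : i ∈ ins) (c c2 : Int)
    (hq : (c, c2) ∈ (axisCuts ins (fun s => s.2.2.1)).zip (axisCuts ins (fun s => s.2.2.1)).tail)
    (y : Int) (h1 : c ≤ y) (h2 : y < c2) (x z : Int) :
    covB (keyOf i) (x, y, z) = covB (keyOf i) (x, c, z) := by
  have hiff := cell_const_axis ins (fun s => s.2.2.1) c c2 y hq h1 h2 i hi
  simp only [covB, keyOf]
  rw [decide_eq_decide]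
  constructor
  · rintro ⟨ha, hb, hc', hd, rest⟩
    exact ⟨ha, hb, (hiff.1 ⟨hc', hd⟩).1, (hiff.1 ⟨hc', hd⟩).2, rest⟩
  · rintro ⟨ha, hb, hc', hd, rest⟩
    exact ⟨ha, hb, (hiff.2 ⟨hc', hd⟩).1, (hiff.2 ⟨hc', hd⟩).2, rest⟩

theorem cov_congr_z (ins : List (Int × (Int × Int) × (Int × Int) × (Int × Int)))
    (i : Int × (Int × Int) × (Int × Int) × (Int × Int)) (hi : i ∈ ins) (c c2 : Int)
    (hq : (c, c2) ∈ (axisCuts ins (fun s => s.2.2.2)).zip (axisCuts ins (fun s => s.2.2.2)).tail)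
    (z : Int) (h1 : c ≤ z) (h2 : z < c2) (x y : Int) :
    covB (keyOf i) (x, y, z) = covB (keyOf i) (x, y, c) := by
  have hiff := cell_const_axis ins (fun s => s.2.2.2) c c2 z hq h1 h2 i hi
  simp only [covB, keyOf]
  rw [decide_eq_decide]
  constructor
  · rintro ⟨ha, hb, hc', hd, he, hf⟩
    exact ⟨ha, hb, hc', hd, (hiff.1 ⟨he, hf⟩).1, (hiff.1 ⟨he, hf⟩).2⟩
  · rintro ⟨ha, hb, hc', hd, he, hf⟩
    exact ⟨ha, hb, hc', hd, (hiff.2 ⟨he, hf⟩).1, (hiff.2 ⟨he, hf⟩).2⟩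

theorem foldl_if_add {β : Type} (L : List β) (P : β → Prop) [DecidablePred P] (F : β → Int) (t0 : Int) :
    L.foldl (fun t e => if P e then t + F e else t) t0
      = t0 + (L.map (fun e => if P e then F e else 0)).sum := by
  rw [PySem.List.foldl_congr_mem _ _ (fun t e => t + (if P e then F e else 0)) t0
    (by intro acc e _; beta_reduce; split_ifs <;> simp)]
  exact PySem.List.foldl_add _ _ _

theorem axis_partition (l : List Int) (hp : l.Pairwise (· < ·)) (hh : l.headD 0 = -50)
    (hl : l.getLastD 0 = 51) (f : Int → Int) :
    ∑ x ∈ Finset.Icc (-50 : Int) 50, f x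
      = ((l.zip l.tail).map (fun q => ∑ x ∈ Finset.Ico q.1 q.2, f x)).sum := by
  have h := sum_Ico_zip l hp f
  rw [hh, hl] at h
  rw [show Finset.Ico (-50 : Int) 51 = Finset.Icc (-50 : Int) 50 from by
    rw [show (51 : Int) = 50 + 1 from by norm_num, Finset.Ico_add_one_right_eq_Icc]] at h
  exact h.symm

theorem solveB_eq (ins : List (Int × (Int × Int) × (Int × Int) × (Int × Int))) :
    solve_alt ins = ∑ p ∈ Box, litA ins p := by
  have hX := axisCuts_sorted ins (fun s => s.2.1)
  have hY := axisCuts_sorted ins (fun s => s.2.2.1)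
  have hZ := axisCuts_sorted ins (fun s => s.2.2.2)
  have hXh : (axisCuts ins (fun s => s.2.1)).headD 0 = -50 :=
    chain_headD _ hX _ ((axisCuts_mem _ _ _).2 (Or.inl rfl))
      (fun y hy => (axisCuts_bounds _ _ y hy).1)
  have hXl : (axisCuts ins (fun s => s.2.1)).getLastD 0 = 51 :=
    chain_getLastD _ hX _ ((axisCuts_mem _ _ _).2 (Or.inr (Or.inl rfl)))
      (fun y hy => (axisCuts_bounds _ _ y hy).2)
  have hYh : (axisCuts ins (fun s => s.2.2.1)).headD 0 = -50 :=
    chain_headD _ hY _ ((axisCuts_mem _ _ _).2 (Or.inl rfl))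
      (fun y hy => (axisCuts_bounds _ _ y hy).1)
  have hYl : (axisCuts ins (fun s => s.2.2.1)).getLastD 0 = 51 :=
    chain_getLastD _ hY _ ((axisCuts_mem _ _ _).2 (Or.inr (Or.inl rfl)))
      (fun y hy => (axisCuts_bounds _ _ y hy).2)
  have hZh : (axisCuts ins (fun s => s.2.2.2)).headD 0 = -50 :=
    chain_headD _ hZ _ ((axisCuts_mem _ _ _).2 (Or.inl rfl))
      (fun y hy => (axisCuts_bounds _ _ y hy).1)
  have hZl : (axisCuts ins (fun s => s.2.2.2)).getLastD 0 = 51 :=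
    chain_getLastD _ hZ _ ((axisCuts_mem _ _ _).2 (Or.inr (Or.inl rfl)))
      (fun y hy => (axisCuts_bounds _ _ y hy).2)
  -- RHS: split the box into nested sums
  rw [Box, Finset.sum_product]
  rw [Finset.sum_congr rfl (fun x _ => Finset.sum_product (Finset.Icc (-50 : Int) 50)
    (Finset.Icc (-50 : Int) 50) (fun yz => litA ins (x, yz)))]
  -- partition the x axis and use constancy on each cell, axis by axis
  rw [axis_partition _ hX hXh hXl
    (fun x => ∑ y ∈ Finset.Icc (-50 : Int) 50, ∑ z ∈ Finset.Icc (-50 : Int) 50, litA ins (x, y, z))]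
  rw [List.map_congr_left (l := (axisCuts ins (fun s => s.2.1)).zip (axisCuts ins (fun s => s.2.1)).tail)
    (g := fun q => (q.2 - q.1) *
      ((((axisCuts ins (fun s => s.2.2.1)).zip (axisCuts ins (fun s => s.2.2.1)).tail).map
        (fun r => (r.2 - r.1) *
          ((((axisCuts ins (fun s => s.2.2.2)).zip (axisCuts ins (fun s => s.2.2.2)).tail).map
            (fun t => (t.2 - t.1) * litA ins (q.1, r.1, t.1))).sum))).sum))
    (fun q hq => by
      beta_reduce
      rw [sum_cell q.1 q.2 (chain_adj_lt _ hX q.1 q.2 (by rwa [Prod.mk.eta])) _ (fun x h1 h2 =>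
        Finset.sum_congr rfl (fun y _ => Finset.sum_congr rfl (fun z _ =>
          litA_congr ins _ _ (fun i hi =>
            cov_congr_x ins i hi q.1 q.2 (by rwa [Prod.mk.eta]) x h1 h2 y z))))]
      congr 1
      rw [axis_partition _ hY hYh hYl
        (fun y => ∑ z ∈ Finset.Icc (-50 : Int) 50, litA ins (q.1, y, z))]
      rw [List.map_congr_left (l := (axisCuts ins (fun s => s.2.2.1)).zip (axisCuts ins (fun s => s.2.2.1)).tail)
        (g := fun r => (r.2 - r.1) *
          ((((axisCuts ins (fun s => s.2.2.2)).zip (axisCuts ins (fun s => s.2.2.2)).tail).map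
            (fun t => (t.2 - t.1) * litA ins (q.1, r.1, t.1))).sum))
        (fun r hr => by
          beta_reduce
          rw [sum_cell r.1 r.2 (chain_adj_lt _ hY r.1 r.2 (by rwa [Prod.mk.eta])) _ (fun y h1 h2 =>
            Finset.sum_congr rfl (fun z _ =>
              litA_congr ins _ _ (fun i hi =>
                cov_congr_y ins i hi r.1 r.2 (by rwa [Prod.mk.eta]) y h1 h2 q.1 z)))]
          congr 1
          rw [axis_partition _ hZ hZh hZl (fun z => litA ins (q.1, r.1, z))]
          rw [List.map_congr_left (l := (axisCuts ins (fun s => s.2.2.2)).zip (axisCuts ins (fun s => s.2.2.2)).tail)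
            (g := fun t => (t.2 - t.1) * litA ins (q.1, r.1, t.1))
            (fun t ht => by
              beta_reduce
              exact sum_cell t.1 t.2 (chain_adj_lt _ hZ t.1 t.2 (by rwa [Prod.mk.eta])) _
                (fun z h1 h2 => litA_congr ins _ _ (fun i hi =>
                  cov_congr_z ins i hi t.1 t.2 (by rwa [Prod.mk.eta]) z h1 h2 q.1 r.1)))])])]
  -- LHS: turn the nested folds into nested list sums
  simp only [solve_alt]
  have hon : ∀ xp yp zp : Int × Int, (ins.foldl (fun on i =>
      if i.2.1.1 ≤ xp.1 ∧ xp.1 ≤ i.2.1.2 ∧ i.2.2.1.1 ≤ yp.1 ∧ yp.1 ≤ i.2.2.1.2 ∧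
         i.2.2.2.1 ≤ zp.1 ∧ zp.1 ≤ i.2.2.2.2 then i.1 else on) 0)
      = litM ins (xp.1, yp.1, zp.1) := by
    intro xp yp zp
    rw [litM]
    exact PySem.List.foldl_congr_mem _ _ _ _ (fun acc i _ => by
      simp only [covB, keyOf, decide_eq_true_eq])
  have hinner : ∀ (xp yp : Int × Int) (t0 : Int),
      ((axisCuts ins (fun s => s.2.2.2)).zip (axisCuts ins (fun s => s.2.2.2)).tail).foldl
        (fun total zp =>
          let on := ins.foldl (fun on i =>
            if i.2.1.1 ≤ xp.1 ∧ xp.1 ≤ i.2.1.2 ∧ i.2.2.1.1 ≤ yp.1 ∧ yp.1 ≤ i.2.2.1.2 ∧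
               i.2.2.2.1 ≤ zp.1 ∧ zp.1 ≤ i.2.2.2.2 then i.1 else on) 0
          if on ≠ 0 then total + (xp.2 - xp.1) * (yp.2 - yp.1) * (zp.2 - zp.1) else total) t0
      = t0 + (((axisCuts ins (fun s => s.2.2.2)).zip (axisCuts ins (fun s => s.2.2.2)).tail).map
          (fun zp => if litM ins (xp.1, yp.1, zp.1) ≠ 0 then
            (xp.2 - xp.1) * (yp.2 - yp.1) * (zp.2 - zp.1) else 0)).sum := by
    intro xp yp t0
    rw [PySem.List.foldl_congr_mem _ _
      (fun total zp => if litM ins (xp.1, yp.1, zp.1) ≠ 0 then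
        total + (xp.2 - xp.1) * (yp.2 - yp.1) * (zp.2 - zp.1) else total) t0
      (fun acc zp _ => by beta_reduce; rw [hon xp yp zp])]
    exact foldl_if_add _ _ _ t0
  have hmid : ∀ (xp : Int × Int) (t0 : Int),
      ((axisCuts ins (fun s => s.2.2.1)).zip (axisCuts ins (fun s => s.2.2.1)).tail).foldl
        (fun total yp =>
          ((axisCuts ins (fun s => s.2.2.2)).zip (axisCuts ins (fun s => s.2.2.2)).tail).foldl
            (fun total zp =>
              let on := ins.foldl (fun on i =>
                if i.2.1.1 ≤ xp.1 ∧ xp.1 ≤ i.2.1.2 ∧ i.2.2.1.1 ≤ yp.1 ∧ yp.1 ≤ i.2.2.1.2 ∧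
                   i.2.2.2.1 ≤ zp.1 ∧ zp.1 ≤ i.2.2.2.2 then i.1 else on) 0
              if on ≠ 0 then total + (xp.2 - xp.1) * (yp.2 - yp.1) * (zp.2 - zp.1) else total)
            total) t0
      = t0 + (((axisCuts ins (fun s => s.2.2.1)).zip (axisCuts ins (fun s => s.2.2.1)).tail).map
          (fun yp => (((axisCuts ins (fun s => s.2.2.2)).zip (axisCuts ins (fun s => s.2.2.2)).tail).map
            (fun zp => if litM ins (xp.1, yp.1, zp.1) ≠ 0 then
              (xp.2 - xp.1) * (yp.2 - yp.1) * (zp.2 - zp.1) else 0)).sum)).sum := by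
    intro xp t0
    rw [PySem.List.foldl_congr_mem _ _
      (fun total yp => total + (((axisCuts ins (fun s => s.2.2.2)).zip
          (axisCuts ins (fun s => s.2.2.2)).tail).map
        (fun zp => if litM ins (xp.1, yp.1, zp.1) ≠ 0 then
          (xp.2 - xp.1) * (yp.2 - yp.1) * (zp.2 - zp.1) else 0)).sum) t0
      (fun acc yp _ => by beta_reduce; exact hinner xp yp acc)]
    exact PySem.List.foldl_add _ _ _
  rw [PySem.List.foldl_congr_mem _ _
    (fun total xp => total + (((axisCuts ins (fun s => s.2.2.1)).zip
        (axisCuts ins (fun s => s.2.2.1)).tail).map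
      (fun yp => (((axisCuts ins (fun s => s.2.2.2)).zip (axisCuts ins (fun s => s.2.2.2)).tail).map
        (fun zp => if litM ins (xp.1, yp.1, zp.1) ≠ 0 then
          (xp.2 - xp.1) * (yp.2 - yp.1) * (zp.2 - zp.1) else 0)).sum)).sum) 0
    (fun acc xp _ => by beta_reduce; exact hmid xp acc)]
  rw [PySem.List.foldl_add, zero_add]
  -- finish: compare the two triple list sums elementwise
  rw [List.map_congr_left (l := (axisCuts ins (fun s => s.2.1)).zip (axisCuts ins (fun s => s.2.1)).tail)
    (g := fun q => (q.2 - q.1) *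
      ((((axisCuts ins (fun s => s.2.2.1)).zip (axisCuts ins (fun s => s.2.2.1)).tail).map
        (fun r => (r.2 - r.1) *
          ((((axisCuts ins (fun s => s.2.2.2)).zip (axisCuts ins (fun s => s.2.2.2)).tail).map
            (fun t => (t.2 - t.1) * litA ins (q.1, r.1, t.1))).sum))).sum))
    (fun q _ => by
      beta_reduce
      rw [List.map_congr_left (l := (axisCuts ins (fun s => s.2.2.1)).zip (axisCuts ins (fun s => s.2.2.1)).tail)
        (g := fun r => (q.2 - q.1) * ((r.2 - r.1) *
          ((((axisCuts ins (fun s => s.2.2.2)).zip (axisCuts ins (fun s => s.2.2.2)).tail).map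
            (fun t => (t.2 - t.1) * litA ins (q.1, r.1, t.1))).sum)))
        (fun r _ => by
          beta_reduce
          rw [List.map_congr_left (l := (axisCuts ins (fun s => s.2.2.2)).zip (axisCuts ins (fun s => s.2.2.2)).tail)
            (g := fun t => (q.2 - q.1) * ((r.2 - r.1) * ((t.2 - t.1) * litA ins (q.1, r.1, t.1))))
            (fun t _ => by
              beta_reduce
              rw [litA_eq_ind]
              split_ifs <;> ring)]
          rw [List.sum_map_mul_left, List.sum_map_mul_left])]
      rw [List.sum_map_mul_left])]

-- ===== VERDICT (by name: the statement is the Claim_ definition above) =====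
theorem solve_spec : Claim_equal_solve := by
  intro ins _
  unfold Spec_solve
  rw [solveA_eq, solveB_eq]
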